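-- pv_equiv track=rewrite | github.com/morganstanley/Xpedite | scripts/lib/xpedite/jupyter/snippetsBuilder.py | breakCommand
-- ===== SOURCE A (Python) =====
-- def breakCommand(cmd, lineSize=150):
--   """Formats commands with line breaks"""
--   fmtCmd = ''
--   begin = 0
--   end = min(lineSize+1, len(cmd))
--   while end - begin > lineSize:
--     index = cmd.rfind(',', begin, end)
--     if index == -1:
--       fmtCmd += cmd[begin:end]
--       begin = end
--     else:
--       fmtCmd += cmd[begin:index+1] + '\n'
--       begin = index+1
--     end = min(begin + lineSize+1, len(cmd))
--   fmtCmd += cmd[begin:end]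
--   return fmtCmd
-- ===== SOURCE B (Python) =====
-- def breakCommand(cmd, lineSize=150):
--   """Formats commands with line breaks"""
--   commas = [i for i, ch in enumerate(cmd) if ch == ',']
--   parts = []
--   p = 0
--   k = 0
--   while len(cmd) - p > lineSize:
--     while k < len(commas) and commas[k] <= p + lineSize:
--       k += 1
--     if k > 0 and commas[k - 1] >= p:
--       c = commas[k - 1]
--       parts.append(cmd[p:c + 1] + '\n')
--       p = c + 1
--     else:
--       parts.append(cmd[p:p + lineSize + 1])
--       p = p + lineSize + 1
--   parts.append(cmd[p:])
--   return ''.join(parts)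
-- ===== Notes on version B (the rewrite author's own statement) =====
-- stated objective: alternative
-- what changed: B precomputes the list of comma positions in one pass and walks it with a monotone pointer to pick the rightmost comma of each window, instead of A's bounded str.rfind backward scan per window; pieces are collected in a list and joined once instead of repeated string +=.
import Mathlib
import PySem

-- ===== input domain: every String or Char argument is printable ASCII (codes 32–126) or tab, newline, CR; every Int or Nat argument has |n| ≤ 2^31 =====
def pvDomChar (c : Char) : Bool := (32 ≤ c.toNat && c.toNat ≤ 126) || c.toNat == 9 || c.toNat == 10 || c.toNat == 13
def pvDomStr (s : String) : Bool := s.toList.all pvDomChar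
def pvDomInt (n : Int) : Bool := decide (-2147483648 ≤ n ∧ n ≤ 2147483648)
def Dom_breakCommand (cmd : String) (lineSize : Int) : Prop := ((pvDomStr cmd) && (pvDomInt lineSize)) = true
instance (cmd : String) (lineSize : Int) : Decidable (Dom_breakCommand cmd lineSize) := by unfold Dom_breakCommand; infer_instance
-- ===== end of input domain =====

-- B replaces A's per-window backwards rfind scan by a comma-position list built in one
-- pass plus a monotone pointer into it (alternative single-pass traversal; not claimed faster).

-- ===== PORT A =====
-- the while loop of A; fuel makes it total (Python diverges for lineSize < 0, excluded by Pre_)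
def breakCommandLoop (cmd : String) (lineSize : Int) : Nat → String → Int → Int → String
  | 0, fmtCmd, _, _ => fmtCmd
  | fuel+1, fmtCmd, b, e =>
    if e - b > lineSize then
      let index := PySem.Str.rfindFrom cmd "," b (some e)
      if index = -1 then
        breakCommandLoop cmd lineSize fuel (fmtCmd ++ PySem.Str.slice cmd (some b) (some e))
          e (min (e + (lineSize + 1)) (PySem.Str.len cmd))
      else
        breakCommandLoop cmd lineSize fuel
          (fmtCmd ++ PySem.Str.slice cmd (some b) (some (index + 1)) ++ "\n")
          (index + 1) (min ((index + 1) + (lineSize + 1)) (PySem.Str.len cmd))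
    else fmtCmd ++ PySem.Str.slice cmd (some b) (some e)

def breakCommand (cmd : String) (lineSize : Int) : String :=
  breakCommandLoop cmd lineSize (cmd.toList.length + 1) "" 0 (min (lineSize + 1) (PySem.Str.len cmd))

-- ===== PORT B =====
-- commas = [i for i, ch in enumerate(cmd) if ch == ',']
def pvCommas (cmd : String) : List Int :=
  ((PySem.List.enumerate cmd.toList).filter (fun ic => ic.2 == ',')).map (fun ic => ic.1)

-- inner while: advance k while k < len(commas) and commas[k] <= bound
def pvAdvance (commas : List Int) (bound : Int) (k : Nat) : Nat :=
  if k < commas.length then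
    if commas.getD k 0 ≤ bound then pvAdvance commas bound (k + 1) else k
  else k
  termination_by commas.length - k

-- outer while of B; fuel as in A's port
def breakCommandAltLoop (cmd : String) (lineSize : Int) (commas : List Int) :
    Nat → List String → Int → Nat → List String
  | 0, parts, _, _ => parts
  | fuel+1, parts, p, k =>
    if PySem.Str.len cmd - p > lineSize then
      let k' := pvAdvance commas (p + lineSize) k
      if 0 < k' ∧ p ≤ commas.getD (k' - 1) 0 then
        let c := commas.getD (k' - 1) 0
        breakCommandAltLoop cmd lineSize commas fuel
          (parts ++ [PySem.Str.slice cmd (some p) (some (c + 1)) ++ "\n"]) (c + 1) k'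
      else
        breakCommandAltLoop cmd lineSize commas fuel
          (parts ++ [PySem.Str.slice cmd (some p) (some (p + (lineSize + 1)))])
          (p + (lineSize + 1)) k'
    else parts ++ [PySem.Str.slice cmd (some p) none]

def breakCommand_alt (cmd : String) (lineSize : Int) : String :=
  PySem.Str.join "" (breakCommandAltLoop cmd lineSize (pvCommas cmd) (cmd.toList.length + 1) [] 0 0)

-- ===== PRECONDITION & SPEC =====
-- Pre_ excludes lineSize < 0, on which Python A (and B) loop forever (end-begin never exceeds a negative lineSize usefully); A returns on every input with lineSize ≥ 0.
def Pre_breakCommand (cmd : String) (lineSize : Int) : Prop := 0 ≤ lineSize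
instance (cmd : String) (lineSize : Int) : Decidable (Pre_breakCommand cmd lineSize) := by
  unfold Pre_breakCommand; infer_instance

def pvWitness_breakCommand : String × Int := ("ab,cd,ef", 3)

def Spec_breakCommand (cmd : String) (lineSize : Int) (out : String) : Prop := out = breakCommand_alt cmd lineSize
instance (cmd : String) (lineSize : Int) (out : String) : Decidable (Spec_breakCommand cmd lineSize out) := by unfold Spec_breakCommand; infer_instance

-- ===== CLAIM (what is proved, stated in full; the proofs are below) =====
def Claim_equal_breakCommand : Prop := ∀ (cmd : String) (lineSize : Int), Dom_breakCommand cmd lineSize → Pre_breakCommand cmd lineSize → Spec_breakCommand cmd lineSize (breakCommand cmd lineSize)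

-- ===== LEMMAS AND PROOFS =====

-- join with empty separator
theorem pvJoin_nil : PySem.Str.join "" [] = "" := by
  simp [PySem.Str.join, PySem.Chars.join, List.intercalate]

theorem pvJoin_cons (x : String) (l : List String) :
    PySem.Str.join "" (x :: l) = x ++ PySem.Str.join "" l := by
  simp only [PySem.Str.join, PySem.Chars.join, List.intercalate, List.map_cons]
  rw [show (List.intersperse ("".toList) (x.toList :: List.map String.toList l)).flatten
      = x.toList ++ (List.intersperse "".toList (List.map String.toList l)).flatten by cases l <;> simp]
  rw [String.ofList_append, String.ofList_toList]

-- the accumulator of B's loop is a pure prefix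
theorem pvAltLoop_prefix (cmd : String) (L : Int) (commas : List Int) :
    ∀ (fuel : Nat) (parts q : List String) (p : Int) (k : Nat),
    breakCommandAltLoop cmd L commas fuel (parts ++ q) p k
      = parts ++ breakCommandAltLoop cmd L commas fuel q p k := by
  intro fuel
  induction fuel with
  | zero => intro parts q p k; simp [breakCommandAltLoop]
  | succ fuel ih =>
    intro parts q p k
    simp only [breakCommandAltLoop]
    split_ifs with h1 h2
    · rw [List.append_assoc, ih]
    · rw [List.append_assoc, ih]
    · rw [List.append_assoc]

-- pvCommas facts
theorem pvCommas_sorted (cmd : String) : (pvCommas cmd).Pairwise (· < ·) := by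
  unfold pvCommas
  apply List.Pairwise.map
  · intro a b h; exact h
  · exact (PySem.List.pairwise_lt_enumerate cmd.toList 0).filter _

theorem mem_pvCommas (cmd : String) (x : Int) :
    x ∈ pvCommas cmd ↔ ∃ i : Nat, x = (i : Int) ∧ cmd.toList[i]? = some ',' := by
  unfold pvCommas
  simp only [List.mem_map, List.mem_filter, PySem.List.mem_enumerate_iff]
  constructor
  · rintro ⟨⟨a, c⟩, ⟨⟨k, hk, hp⟩, hc⟩, rfl⟩
    simp only [Prod.mk.injEq] at hp
    simp only [beq_iff_eq] at hc
    refine ⟨k, by simp [hp.1], ?_⟩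
    rw [List.getElem?_eq_getElem hk, ← hp.2, hc]
  · rintro ⟨i, rfl, hi⟩
    have hlen : i < cmd.toList.length := by
      by_contra h
      rw [List.getElem?_eq_none (by omega)] at hi; simp at hi
    have hv : cmd.toList[i] = ',' := by
      have := List.getElem?_eq_getElem hlen
      rw [this] at hi; exact Option.some.inj hi
    exact ⟨((i : Int), ','), ⟨⟨i, hlen, by rw [hv]; norm_num⟩, by simp⟩, rfl⟩

theorem pvGetD_eq (l : List Int) (i : Nat) (h : i < l.length) : l.getD i 0 = l[i] := by
  exact List.getD_eq_getElem l 0 h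

theorem pvAdvance_spec (commas : List Int) (bound : Int) (k : Nat)
    (hs : commas.Pairwise (· < ·)) (hk : k ≤ commas.length)
    (hinv : ∀ i < k, commas.getD i 0 ≤ bound) :
    pvAdvance commas bound k ≤ commas.length ∧
    (∀ i < pvAdvance commas bound k, commas.getD i 0 ≤ bound) ∧
    (∀ i, pvAdvance commas bound k ≤ i → i < commas.length → bound < commas.getD i 0) ∧
    k ≤ pvAdvance commas bound k := by
  fun_induction pvAdvance commas bound k with
  | case1 k h1 h2 ih =>
    obtain ⟨a, b, c, d⟩ := ih (by omega) (fun i hi => by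
      rcases Nat.lt_succ_iff_lt_or_eq.mp hi with h | h
      · exact hinv i h
      · subst h; exact h2)
    exact ⟨a, b, c, by omega⟩
  | case2 k h1 h2 =>
    refine ⟨by omega, hinv, ?_, le_refl _⟩
    intro i hki hilen
    rcases Nat.eq_or_lt_of_le hki with h | h
    · subst h; omega
    · have hp := List.pairwise_iff_getElem.mp hs k i h1 hilen h
      have e1 := pvGetD_eq commas k h1
      have e2 := pvGetD_eq commas i hilen
      omega
  | case3 k h1 =>
    refine ⟨by omega, hinv, ?_, le_refl _⟩
    intro i hki hilen; omega

theorem pvPrefix_singleton (c : Char) (w : List Char) (i : Nat) :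
    ([c].isPrefixOf (w.drop i)) = true ↔ w[i]? = some c := by
  rcases h : w.drop i with _ | ⟨x, t⟩
  · constructor
    · intro hp; simp [List.isPrefixOf] at hp
    · intro hp
      have : i < w.length := by
        by_contra hh
        rw [List.getElem?_eq_none (by omega)] at hp; simp at hp
      have := List.length_drop (l := w) (i := i)
      rw [h] at this; simp at this; omega
  · have hlen : i < w.length := by
      have := List.length_drop (l := w) (i := i)
      rw [h] at this; simp at this; omega
    have hx : w[i] = x := by
      have : (w.drop i)[0]'(by rw [h]; simp) = w[i + 0]'(by omega) := List.getElem_drop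
      simp only [h] at this; simpa using this.symm
    rw [List.getElem?_eq_getElem hlen, hx]
    simp [List.isPrefixOf]
    exact eq_comm

theorem pvGo_none (w : List Char) (c : Char) (j : Nat)
    (h : ∀ i ≤ j, w[i]? ≠ some c) : PySem.Chars.rfind.go w [c] j = -1 := by
  induction j with
  | zero =>
    have h0 := h 0 le_rfl
    simp only [PySem.Chars.rfind.go]
    rw [if_neg]
    intro hp
    exact h0 ((pvPrefix_singleton c w 0).mp (by simpa using hp))
  | succ j ih =>
    simp only [PySem.Chars.rfind.go]
    rw [if_neg]
    · exact ih (fun i hi => h i (by omega))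
    · intro hp
      exact h (j+1) le_rfl ((pvPrefix_singleton c w (j+1)).mp hp)

theorem pvGo_max (w : List Char) (c : Char) (j m : Nat) (hm : m ≤ j)
    (hc : w[m]? = some c) (hmax : ∀ i, m < i → i ≤ j → w[i]? ≠ some c) :
    PySem.Chars.rfind.go w [c] j = (m : Int) := by
  induction j with
  | zero =>
    have : m = 0 := by omega
    subst this
    simp only [PySem.Chars.rfind.go]
    rw [if_pos (by have := (pvPrefix_singleton c w 0).mpr hc; simpa using this)]
    simp
  | succ j ih =>
    simp only [PySem.Chars.rfind.go]
    by_cases hmj : m = j + 1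
    · subst hmj
      rw [if_pos ((pvPrefix_singleton c w (j+1)).mpr hc)]
    · rw [if_neg]
      · exact ih (by omega) (fun i hi hij => hmax i hi (by omega))
      · intro hp
        exact hmax (j+1) (by omega) le_rfl ((pvPrefix_singleton c w (j+1)).mp hp)

theorem pvSorted_le (l : List Int) (hs : l.Pairwise (· < ·)) (i j : Nat) (hij : i ≤ j)
    (hj : j < l.length) : l[i]'(by omega) ≤ l[j] := by
  rcases Nat.eq_or_lt_of_le hij with h | h
  · subst h; exact le_refl _
  · exact le_of_lt (List.pairwise_iff_getElem.mp hs i j (by omega) hj h)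

theorem pvCrux (cmd : String) (l b : Nat) (hbound : b + l + 1 ≤ cmd.toList.length)
    (k' : Nat) (hk'len : k' ≤ (pvCommas cmd).length)
    (hle : ∀ i < k', (pvCommas cmd).getD i 0 ≤ (b : Int) + l)
    (hgt : ∀ i, k' ≤ i → i < (pvCommas cmd).length → (b : Int) + l < (pvCommas cmd).getD i 0) :
    PySem.Str.rfindFrom cmd "," (b : Int) (some ((b + l + 1 : Nat) : Int)) =
      if 0 < k' ∧ (b : Int) ≤ (pvCommas cmd).getD (k' - 1) 0
      then (pvCommas cmd).getD (k' - 1) 0 else -1 := by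
  have hcomma : (",".toList) = [','] := by decide
  rw [PySem.Str.rfindFrom_eq, hcomma]
  set cs := cmd.toList with hcs
  set n := cs.length with hn
  -- unfold rfindFrom on in-range natural bounds
  have hunf : PySem.Chars.rfindFrom cs [','] (b : Int) (some ((b + l + 1 : Nat) : Int)) =
      (let r := PySem.Chars.rfind ((cs.take (b + l + 1)).drop b) [','];
       if r = -1 then -1 else (b : Int) + r) := by
    simp only [PySem.Chars.rfindFrom]
    split_ifs with h1 h2 h3 h4 <;> push_cast at * <;>
      simp only [show ((b : Int)).toNat = b from by omega,
        show ((b : Int) + (l : Int) + 1).toNat = b + l + 1 from by omega] at * <;>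
      first | rfl | omega
  rw [hunf]
  set commas := pvCommas cmd with hcm
  set w := (cs.take (b + l + 1)).drop b with hw
  have hwlen : w.length = l + 1 := by rw [hw]; simp; omega
  have hwget : ∀ i : Nat, i ≤ l → w[i]? = cs[b + i]? := by
    intro i hi
    rw [hw, List.getElem?_drop, List.getElem?_take_of_lt (by omega)]
  have hwnone : w[l + 1]? = none := List.getElem?_eq_none_iff.mpr (by omega)
  -- a comma inside the window corresponds to an entry of commas below k'
  have hwin : ∀ i : Nat, i ≤ l → w[i]? = some ',' →
      ∃ j : Nat, ∃ hj : j < commas.length, j < k' ∧ commas[j] = ((b + i : Nat) : Int) := by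
    intro i hi hc
    rw [hwget i hi] at hc
    have hmem : ((b + i : Nat) : Int) ∈ commas := (mem_pvCommas cmd _).mpr ⟨b + i, rfl, hc⟩
    obtain ⟨j, hj, hjv⟩ := List.mem_iff_getElem.mp hmem
    refine ⟨j, hj, ?_, hjv⟩
    by_contra hnk
    have := hgt j (by omega) hj
    rw [pvGetD_eq _ _ hj, hjv] at this
    push_cast at this; omega
  by_cases hcase : 0 < k' ∧ (b : Int) ≤ commas.getD (k' - 1) 0
  · obtain ⟨hk0, hbc⟩ := hcase
    have hk1 : k' - 1 < commas.length := by omega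
    have hmem : commas.getD (k' - 1) 0 ∈ commas := by
      rw [pvGetD_eq _ _ hk1]; exact List.getElem_mem hk1
    obtain ⟨m, hm, hmc⟩ := (mem_pvCommas cmd _).mp hmem
    have hmle : (m : Int) ≤ (b : Int) + l := by rw [← hm]; exact hle (k' - 1) (by omega)
    have hbm : b ≤ m := by rw [hm] at hbc; omega
    have hmbl : m ≤ b + l := by omega
    have hmax : ∀ i, m - b < i → i ≤ w.length → w[i]? ≠ some ',' := by
      intro i hi1 hi2 hcon
      rcases Nat.lt_or_ge i (l + 1) with hil | hil
      · obtain ⟨j, hj, hjk, hjv⟩ := hwin i (by omega) hcon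
        have hle' : commas[j] ≤ commas[k' - 1]'(hk1) := pvSorted_le commas (pvCommas_sorted cmd) j (k' - 1) (by omega) hk1
        rw [hjv] at hle'
        rw [pvGetD_eq _ _ hk1] at hm
        rw [hm] at hle'
        push_cast at hle'; omega
      · have : i = l + 1 := by omega
        rw [this, hwnone] at hcon; simp at hcon
    have hmc' : w[m - b]? = some ',' := by
      rw [hwget (m - b) (by omega), show b + (m - b) = m from by omega]; exact hmc
    have hgo : PySem.Chars.rfind.go w [','] w.length = ((m - b : Nat) : Int) :=
      pvGo_max w ',' w.length (m - b) (by omega) hmc' hmax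
    simp only [PySem.Chars.rfind]
    rw [hgo]
    rw [if_neg (by omega), if_pos ⟨hk0, hbc⟩, hm]
    push_cast; omega
  · have hnone : ∀ i, i ≤ w.length → w[i]? ≠ some ',' := by
      intro i hi hcon
      rcases Nat.lt_or_ge i (l + 1) with hil | hil
      · obtain ⟨j, hj, hjk, hjv⟩ := hwin i (by omega) hcon
        apply hcase
        constructor
        · omega
        · have hk1 : k' - 1 < commas.length := by omega
          have hle' : commas[j] ≤ commas[k' - 1]'(hk1) := pvSorted_le commas (pvCommas_sorted cmd) j (k' - 1) (by omega) hk1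
          rw [hjv] at hle'
          rw [pvGetD_eq _ _ hk1]
          push_cast at hle'; omega
      · have : i = l + 1 := by omega
        rw [this, hwnone] at hcon; simp at hcon
    have hgo : PySem.Chars.rfind.go w [','] w.length = -1 :=
      pvGo_none w ',' w.length (fun i hi => hnone i hi)
    simp only [PySem.Chars.rfind]
    rw [hgo]
    rw [if_pos rfl, if_neg hcase]

theorem pvStrLen (cmd : String) : PySem.Str.len cmd = (cmd.toList.length : Int) := by
  simp [PySem.Str.len]

theorem pvSliceEnd (cmd : String) (b : Nat) :
    PySem.Str.slice cmd (some (b : Int)) (some ((cmd.toList.length : Nat) : Int)) =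
      PySem.Str.slice cmd (some (b : Int)) none := by
  unfold PySem.Str.slice
  congr 1
  rw [PySem.Chars.slice_eq_listSlice, PySem.Chars.slice_eq_listSlice,
    PySem.List.slice_natCast, PySem.List.slice_from_natCast]
  exact List.take_of_length_le (by simp)

theorem pvAltLoop_cons (cmd : String) (L : Int) (commas : List Int) (fuel : Nat)
    (x : String) (p : Int) (k : Nat) :
    breakCommandAltLoop cmd L commas fuel [x] p k
      = x :: breakCommandAltLoop cmd L commas fuel [] p k := by
  simpa using pvAltLoop_prefix cmd L commas fuel [x] [] p k

theorem pvMain (cmd : String) (l : Nat) :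
    ∀ (fuel b k : Nat) (fmt : String),
    cmd.toList.length + 1 ≤ fuel + b →
    k ≤ (pvCommas cmd).length →
    (∀ i < k, (pvCommas cmd).getD i 0 ≤ (b : Int) + (l : Int)) →
    breakCommandLoop cmd (l : Int) fuel fmt (b : Int)
        (min ((b : Int) + ((l : Int) + 1)) (PySem.Str.len cmd)) =
      fmt ++ PySem.Str.join "" (breakCommandAltLoop cmd (l : Int) (pvCommas cmd) fuel [] (b : Int) k) := by
  intro fuel
  induction fuel with
  | zero =>
    intro b k fmt hfuel hk hinv
    simp [breakCommandLoop, breakCommandAltLoop, pvJoin_nil]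
  | succ fuel ih =>
    intro b k fmt hfuel hk hinv
    have hlen : PySem.Str.len cmd = (cmd.toList.length : Int) := pvStrLen cmd
    simp only [breakCommandLoop, breakCommandAltLoop]
    by_cases hin : b + l + 1 ≤ cmd.toList.length
    · -- still inside the loop
      have he : min ((b : Int) + ((l : Int) + 1)) (PySem.Str.len cmd) = ((b + l + 1 : Nat) : Int) := by
        rw [hlen]; push_cast; omega
      have hcondA : ((b + l + 1 : Nat) : Int) - (b : Int) > (l : Int) := by push_cast; omega
      have hcondB : PySem.Str.len cmd - (b : Int) > (l : Int) := by rw [hlen]; push_cast; omega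
      rw [he, if_pos hcondA, if_pos hcondB]
      obtain ⟨ha, hb, hc, hd⟩ := pvAdvance_spec (pvCommas cmd) ((b : Int) + (l : Int)) k
        (pvCommas_sorted cmd) hk hinv
      have hcrux := pvCrux cmd l b hin (pvAdvance (pvCommas cmd) ((b : Int) + (l : Int)) k) ha hb hc
      rw [hcrux]
      by_cases hcase : 0 < pvAdvance (pvCommas cmd) ((b : Int) + (l : Int)) k ∧
          (b : Int) ≤ (pvCommas cmd).getD (pvAdvance (pvCommas cmd) ((b : Int) + (l : Int)) k - 1) 0
      · -- comma found in the window
        have hk1 : pvAdvance (pvCommas cmd) ((b : Int) + (l : Int)) k - 1 < (pvCommas cmd).length := by omega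
        have hmem : (pvCommas cmd).getD (pvAdvance (pvCommas cmd) ((b : Int) + (l : Int)) k - 1) 0 ∈ pvCommas cmd := by
          rw [pvGetD_eq _ _ hk1]; exact List.getElem_mem hk1
        obtain ⟨m, hm, hmc⟩ := (mem_pvCommas cmd _).mp hmem
        have hmlt : m < cmd.toList.length := by
          by_contra hh
          rw [List.getElem?_eq_none (by omega)] at hmc; simp at hmc
        have hble : (b : Int) ≤ (m : Int) := by rw [hm] at hcase; exact hcase.2
        have hbm : b ≤ m := by omega
        rw [if_pos hcase, if_pos hcase]
        rw [if_neg (show ¬((pvCommas cmd).getD (pvAdvance (pvCommas cmd) ((b : Int) + (l : Int)) k - 1) 0 = -1) from by rw [hm]; intro hcon; omega)]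
        rw [hm]
        have hc1 : (m : Int) + 1 = ((m + 1 : Nat) : Int) := by push_cast; ring
        rw [hc1]
        have hrec := ih (m + 1) (pvAdvance (pvCommas cmd) ((b : Int) + (l : Int)) k)
          (fmt ++ PySem.Str.slice cmd (some (b : Int)) (some ((m + 1 : Nat) : Int)) ++ "\n")
          (by omega) ha
          (fun i hi => le_trans (hb i hi) (by push_cast; omega))
        rw [hrec]
        simp only [List.nil_append]
        rw [pvAltLoop_cons, pvJoin_cons]
        simp [String.append_assoc]
      · -- no comma in the window
        rw [if_neg hcase, if_neg hcase, if_pos rfl]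
        have hc2 : (b : Int) + ((l : Int) + 1) = ((b + l + 1 : Nat) : Int) := by push_cast; ring
        rw [hc2]
        have hrec := ih (b + l + 1) (pvAdvance (pvCommas cmd) ((b : Int) + (l : Int)) k)
          (fmt ++ PySem.Str.slice cmd (some (b : Int)) (some ((b + l + 1 : Nat) : Int)))
          (by omega) ha
          (fun i hi => le_trans (hb i hi) (by push_cast; omega))
        rw [hrec]
        simp only [List.nil_append]
        rw [pvAltLoop_cons, pvJoin_cons]
        simp [String.append_assoc]
    · -- loop exit
      have he : min ((b : Int) + ((l : Int) + 1)) (PySem.Str.len cmd) = ((cmd.toList.length : Nat) : Int) := by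
        rw [hlen]; push_cast; omega
      rw [he]
      rw [if_neg (show ¬(((cmd.toList.length : Nat) : Int) - (b : Int) > (l : Int)) from by push_cast; omega),
        if_neg (show ¬(PySem.Str.len cmd - (b : Int) > (l : Int)) from by rw [hlen]; push_cast; omega)]
      rw [pvSliceEnd cmd b]
      simp only [List.nil_append]
      rw [pvJoin_cons, pvJoin_nil]
      simp

-- ===== VERDICT (by name: the statement is the Claim_ definition above) =====
theorem breakCommand_spec : Claim_equal_breakCommand := by
  intro cmd lineSize hdom hpre
  show breakCommand cmd lineSize = breakCommand_alt cmd lineSize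
  unfold breakCommand breakCommand_alt
  obtain ⟨l, rfl⟩ : ∃ l : Nat, lineSize = (l : Int) :=
    ⟨lineSize.toNat, (Int.toNat_of_nonneg hpre).symm⟩
  have h := pvMain cmd l (cmd.toList.length + 1) 0 0 "" (by omega) (Nat.zero_le _)
    (fun i hi => absurd hi (by omega))
  simpa using h
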